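-- pv_equiv track=rewrite | github.com/alfre97x/s2-chipper-ship-pass-scheduler-AIS | src/pipeline.py | _resolve_asset_key
-- ===== SOURCE A (Python) =====
-- from typing import Dict, Any, List, Optional, Tuple
--
-- def _resolve_asset_key(assets: Dict[str, Any], desired: str) -> Optional[str]:
--     keys = list(assets.keys())
--     name = desired.upper()
--
--     # Provider alias maps (Earth Search naming)
--     alias_map = {
--         "B02": ["blue", "coastal"],           # 10m
--         "B03": ["green"],                     # 10m
--         "B04": ["red"],                       # 10m
--         "B08": ["nir", "nir08"],              # 10m
--         "B11": ["swir16"],                    # 20m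
--         "B12": ["swir22"],                    # 20m
--         "SCL": ["scl", "scl_20m", "classification", "scene_classification"],
--     }
--
--     # Prefer COG/GeoTIFF keys over JP2 when both exist
--     def best_from(candidates: List[str]) -> Optional[str]:
--         # strict matches in given order
--         for c in candidates:
--             if c in assets:
--                 return c
--             # also consider hyphenated variants like "blue-jp2"
--             if f"{c}-jp2" in assets:
--                 # keep as fallback, but only if nothing else is present
--                 pass
--         # if no straight match, allow jp2 variants explicitly
--         for c in candidates:
--             jp2 = f"{c}-jp2"
--             if jp2 in assets:
--                 return jp2
--         return None
--
--     # 1) Alias resolution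
--     if name in alias_map:
--         res = best_from(alias_map[name])
--         if res:
--             return res
--
--     # 2) Generic candidate expansion
--     candidates: List[str] = [desired, desired.upper(), desired.lower()]
--     if name.startswith("B"):  # spectral bands
--         band = name
--         candidates.extend([
--             f"{band}_10m", f"{band}_20m", f"{band}_60m",
--             f"{band.lower()}_10m", f"{band.lower()}_20m", f"{band.lower()}_60m",
--         ])
--     if name == "SCL":
--         candidates.extend(["SCL_20m", "scl_20m", "classification", "scene_classification"])
--
--     res = best_from([c if isinstance(c, str) else str(c) for c in candidates])
--     if res:
--         return res
--
--     # 3) Fuzzy: any key that starts with the desired token (case-insensitive)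
--     for k in keys:
--         if k.upper().startswith(name):
--             return k
--     return None
-- ===== SOURCE B (Python) =====
-- from typing import Dict, Any, Optional
--
-- def _resolve_asset_key(assets: Dict[str, Any], desired: str) -> Optional[str]:
--     name = desired.upper()
--     alias_map = {
--         "B02": ["blue", "coastal"],
--         "B03": ["green"],
--         "B04": ["red"],
--         "B08": ["nir", "nir08"],
--         "B11": ["swir16"],
--         "B12": ["swir22"],
--         "SCL": ["scl", "scl_20m", "classification", "scene_classification"],
--     }
--     aliases = alias_map.get(name, [])
--     generic = [desired, name, desired.lower()]
--     if name.startswith("B"):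
--         generic += [b + "_" + s for b in (name, name.lower()) for s in ("10m", "20m", "60m")]
--     if name == "SCL":
--         generic += ["SCL_20m", "scl_20m", "classification", "scene_classification"]
--     ordered = (aliases + [c + "-jp2" for c in aliases]
--                + generic + [c + "-jp2" for c in generic])
--     # invert the priority list: candidate -> its best (first) priority rank
--     rank = {}
--     for i, c in enumerate(ordered):
--         rank.setdefault(c, i)
--     # one pass over the assets: collect the ranks of the keys that are candidates
--     hits = [rank[k] for k in assets if k in rank]
--     if hits:
--         c = ordered[min(hits)]
--         if c:
--             return c
--     for k in assets:
--         if k.upper().startswith(name):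
--             return k
--     return None
-- ===== Notes on version B (the rewrite author's own statement) =====
-- stated objective: alternative
-- what changed: Instead of A's staged best_from helper that probes each candidate against the dict (straight pass then -jp2 pass, alias stage then generic stage), B inverts the search: it builds a candidate->priority rank index once, makes one pass over the assets collecting the ranks of keys that are candidates, and returns the candidate at the minimum rank; the fuzzy prefix fallback is unchanged.
import Mathlib
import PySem

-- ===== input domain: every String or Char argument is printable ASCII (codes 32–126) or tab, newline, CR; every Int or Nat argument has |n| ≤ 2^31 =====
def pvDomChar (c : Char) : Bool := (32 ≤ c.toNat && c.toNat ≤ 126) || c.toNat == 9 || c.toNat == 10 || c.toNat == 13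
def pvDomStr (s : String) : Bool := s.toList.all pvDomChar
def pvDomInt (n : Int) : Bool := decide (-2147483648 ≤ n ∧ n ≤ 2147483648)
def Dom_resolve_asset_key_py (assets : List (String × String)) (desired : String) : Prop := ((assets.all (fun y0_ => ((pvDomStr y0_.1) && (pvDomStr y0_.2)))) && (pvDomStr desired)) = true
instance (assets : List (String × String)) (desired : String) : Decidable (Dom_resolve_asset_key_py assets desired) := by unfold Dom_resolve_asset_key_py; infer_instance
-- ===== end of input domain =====

-- B replaces A's staged candidate-probing helper by an inverted index: a candidate->priority-rank
-- dict built once, one pass over the assets collecting ranks, and a minimum (alternative structure).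


-- ===== PORT A =====
-- both Pythons contain this identical alias_map literal
def pvAliasMap : List (String × List String) :=
  [("B02", ["blue", "coastal"]),
   ("B03", ["green"]),
   ("B04", ["red"]),
   ("B08", ["nir", "nir08"]),
   ("B11", ["swir16"]),
   ("B12", ["swir22"]),
   ("SCL", ["scl", "scl_20m", "classification", "scene_classification"])]

-- `k in assets` for a Python dict given as an association list
def pvHasKey (assets : List (String × String)) (k : String) : Bool :=
  assets.any (fun kv => kv.1 == k)

-- A's helper best_from: first loop (straight matches; its jp2 check is a no-op `pass`), then jp2 loop
def pvBestFrom (assets : List (String × String)) (cs : List String) : Option String :=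
  match cs.find? (fun c => pvHasKey assets c) with
  | some c => some c
  | none =>
    match cs.find? (fun c => pvHasKey assets (c ++ "-jp2")) with
    | some c => some (c ++ "-jp2")
    | none => none

-- Python truthiness of an Optional[str] (`if res:`)
def pvTruthy : Option String → Bool
  | some s => !(s == "")
  | none => false

def resolve_asset_key_py (assets : List (String × String)) (desired : String) : Option String :=
  let keys := assets.map Prod.fst
  let name := PySem.Str.upper desired
  let aliasRes : Option String :=
    match (pvAliasMap.find? (fun p => p.1 == name)).map Prod.snd with
    | some al => pvBestFrom assets al
    | none => none
  if pvTruthy aliasRes then aliasRes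
  else
    -- A's `[c if isinstance(c, str) else str(c) for c in candidates]` is the identity: all entries are str
    let candidates : List String :=
      [desired, PySem.Str.upper desired, PySem.Str.lower desired]
        ++ (if PySem.Str.startswith name "B" then
              [name ++ "_10m", name ++ "_20m", name ++ "_60m",
               PySem.Str.lower name ++ "_10m", PySem.Str.lower name ++ "_20m",
               PySem.Str.lower name ++ "_60m"]
            else [])
        ++ (if name == "SCL" then
              ["SCL_20m", "scl_20m", "classification", "scene_classification"]
            else [])
    let res := pvBestFrom assets candidates
    if pvTruthy res then res
    else keys.find? (fun k => PySem.Str.startswith (PySem.Str.upper k) name)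

-- ===== PORT B =====
def resolve_asset_key_py_alt (assets : List (String × String)) (desired : String) : Option String :=
  let name := PySem.Str.upper desired
  let aliases := ((pvAliasMap.find? (fun p => p.1 == name)).map Prod.snd).getD []
  let generic : List String :=
    [desired, name, PySem.Str.lower desired]
      ++ (if PySem.Str.startswith name "B" then
            [name, PySem.Str.lower name].flatMap
              (fun b => ["10m", "20m", "60m"].map (fun s => b ++ "_" ++ s))
          else [])
      ++ (if name == "SCL" then
            ["SCL_20m", "scl_20m", "classification", "scene_classification"]
          else [])
  let ordered := aliases ++ aliases.map (fun c => c ++ "-jp2")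
      ++ generic ++ generic.map (fun c => c ++ "-jp2")
  -- for i, c in enumerate(ordered): rank.setdefault(c, i)
  let rank : PySem.Dict String Int :=
    (PySem.List.enumerate ordered).foldl (fun d ic => d.setdefault ic.2 ic.1) PySem.Dict.empty
  -- hits = [rank[k] for k in assets if k in rank]
  let hits : List Int := (assets.map Prod.fst).filterMap (fun k => rank.get? k)
  let fuzzy := (assets.map Prod.fst).find? (fun k => PySem.Str.startswith (PySem.Str.upper k) name)
  match PySem.List.min? hits (fun x => x) with
  | some i =>
    match PySem.List.pyGet? ordered i with
    | some c => if c == "" then fuzzy else some c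
    | none => none      -- unreachable: every rank is a valid index of `ordered`
  | none => fuzzy

-- ===== PRECONDITION & SPEC =====
def Spec_resolve_asset_key_py (assets : List (String × String)) (desired : String) (out : Option String) : Prop := out = resolve_asset_key_py_alt assets desired
instance (assets : List (String × String)) (desired : String) (out : Option String) : Decidable (Spec_resolve_asset_key_py assets desired out) := by unfold Spec_resolve_asset_key_py; infer_instance

-- ===== CLAIM (what is proved, stated in full; the proofs are below) =====
def Claim_equal_resolve_asset_key_py : Prop := ∀ (assets : List (String × String)) (desired : String), Dom_resolve_asset_key_py assets desired → Spec_resolve_asset_key_py assets desired (resolve_asset_key_py assets desired)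

-- ===== LEMMAS AND PROOFS =====

theorem pv_append_ne_empty (a b : String) (hb : b ≠ "") : a ++ b ≠ "" := by
  intro h
  apply hb
  have h2 : (a ++ b).toList = ([] : List Char) := by rw [h]; rfl
  simp only [String.toList_append, List.append_eq_nil_iff] at h2
  cases b; simp_all

theorem pv_hasKey_contains (assets : List (String × String)) (c : String) :
    pvHasKey assets c = (assets.map Prod.fst).contains c := by
  rw [pvHasKey, Bool.eq_iff_iff]
  simp [List.any_eq_true, List.mem_map, BEq.comm]

-- A's staged shape (alias stage then generic stage, each straight-then-jp2, per-stage truthy gate)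
-- equals one find? over the flattened priority list followed by one truthy gate, provided the alias
-- candidates are nonempty strings (they are literals).
theorem pv_A_flat (assets : List (String × String)) (al gen : List String) (fz : Option String)
    (hal : ∀ c ∈ al, c ≠ "") :
    (if pvTruthy (pvBestFrom assets al) then pvBestFrom assets al
     else if pvTruthy (pvBestFrom assets gen) then pvBestFrom assets gen else fz)
    = match (al ++ al.map (fun c => c ++ "-jp2") ++ gen ++ gen.map (fun c => c ++ "-jp2")).find?
          (fun c => pvHasKey assets c) with
      | some c => if c == "" then fz else some c
      | none => fz := by
  simp only [List.append_assoc, List.find?_append, List.find?_map]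
  unfold pvBestFrom
  rcases h1 : al.find? (fun c => pvHasKey assets c) with _ | c1
  · rcases h2 : al.find? (fun c => pvHasKey assets (c ++ "-jp2")) with _ | c2
    · simp only [Option.none_or]
      have h2' : al.find? ((fun c => pvHasKey assets c) ∘ (fun c => c ++ "-jp2")) = none := h2
      rw [h2']
      simp only [Option.map_none, Option.none_or]
      rcases h3 : gen.find? (fun c => pvHasKey assets c) with _ | c3
      · rcases h4 : gen.find? (fun c => pvHasKey assets (c ++ "-jp2")) with _ | c4
        · have h4' : gen.find? ((fun c => pvHasKey assets c) ∘ (fun c => c ++ "-jp2")) = none := h4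
          rw [h4']
          simp [pvTruthy]
        · have h4' : gen.find? ((fun c => pvHasKey assets c) ∘ (fun c => c ++ "-jp2")) = some c4 := h4
          rw [h4']
          simp [pvTruthy, pv_append_ne_empty c4 "-jp2" (by decide)]
      · by_cases hc3 : c3 = ""
        · subst hc3; simp [pvTruthy]
        · simp [pvTruthy, hc3]
    · have h2' : al.find? ((fun c => pvHasKey assets c) ∘ (fun c => c ++ "-jp2")) = some c2 := h2
      rw [h2']
      simp [pvTruthy, pv_append_ne_empty c2 "-jp2" (by decide)]
  · have hc1 : c1 ≠ "" := hal c1 (List.mem_of_find?_eq_some h1)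
    simp [pvTruthy, hc1]

theorem pv_alias_nonempty (name : String) (p : String × List String)
    (h : pvAliasMap.find? (fun q => q.1 == name) = some p) :
    ∀ c ∈ p.2, c ≠ "" := by
  have hmem : p ∈ pvAliasMap := List.mem_of_find?_eq_some h
  have hall : ∀ q ∈ pvAliasMap, ∀ c ∈ q.2, c ≠ "" := by decide
  exact hall p hmem

-- the rank dict built by the enumerate/setdefault loop is the first-occurrence index map
theorem pv_rank_get_gen (l : List String) (s : Int) (d : PySem.Dict String Int) (c : String) :
    ((PySem.List.enumerate l s).foldl (fun d ic => d.setdefault ic.2 ic.1) d).get? c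
      = (d.get? c).or (Option.map (fun n : Nat => s + (n : Int)) (PySem.List.index? l c)) := by
  induction l generalizing s d with
  | nil => simp [PySem.List.enumerate_nil, PySem.List.index?_eq_idxOf?, List.idxOf?]
  | cons a t ih =>
    rw [PySem.List.enumerate_cons]
    simp only [List.foldl_cons]
    rw [ih]
    by_cases hac : a = c
    · subst hac
      rw [PySem.Dict.get?_setdefault_self]
      rw [PySem.List.index?_cons_self a t]
      rcases hd : d.get? a with _ | v <;> simp
    · rw [PySem.Dict.get?_setdefault_of_ne d s (fun h => hac h.symm)]
      rw [PySem.List.index?_cons_of_ne t hac]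
      rcases hi : PySem.List.index? t c with _ | n
      · simp
      · simp only [Option.map_some]
        have he : s + 1 + (n : Int) = s + ((n + 1 : Nat) : Int) := by push_cast; ring
        rw [he]

theorem pv_rank_get (l : List String) (c : String) :
    ((PySem.List.enumerate l).foldl (fun d ic => d.setdefault ic.2 ic.1) PySem.Dict.empty).get? c
      = Option.map (fun n : Nat => (n : Int)) (PySem.List.index? l c) := by
  rw [pv_rank_get_gen l 0 PySem.Dict.empty c]
  rw [PySem.Dict.get?_empty]
  cases PySem.List.index? l c <;> simp

-- when no candidate is a key, the one-pass hits list is empty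
theorem pv_hits_nil (ordered ks : List String)
    (hnone : ∀ c ∈ ordered, (ks.contains c) = false) :
    ks.filterMap (fun k => Option.map (fun n : Nat => (n : Int)) (PySem.List.index? ordered k)) = [] := by
  rw [List.filterMap_eq_nil_iff]
  intro k hk
  have : PySem.List.index? ordered k = none := by
    rw [PySem.List.index?_eq_none_iff]
    intro hmem
    have h2 := hnone k hmem
    rw [List.contains_iff_mem.2 hk] at h2
    simp at h2
  rw [this]
  rfl

-- when some candidate is a key, min over the collected ranks is the rank of the FIRST such
-- candidate, and indexing the priority list there returns it
theorem pv_hits_min (ordered ks : List String) (c : String)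
    (hfind : ordered.find? (fun x => ks.contains x) = some c) :
    ∃ i : Int,
      PySem.List.min? (ks.filterMap (fun k => Option.map (fun n : Nat => (n : Int)) (PySem.List.index? ordered k))) (fun x => x) = some i
      ∧ PySem.List.pyGet? ordered i = some c := by
  rw [List.find?_eq_some_iff_append] at hfind
  obtain ⟨hc, l1, l2, hsplit, hpre⟩ := hfind
  have hcks : c ∈ ks := by simpa [List.contains_iff_mem] using hc
  have hpre' : ∀ x ∈ l1, x ∉ ks := by
    intro x hx
    have := hpre x hx
    simpa [List.contains_iff_mem] using this
  set hits := ks.filterMap (fun k => Option.map (fun n : Nat => (n : Int)) (PySem.List.index? ordered k)) with hhits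
  have hjmem : ((l1.length : Int)) ∈ hits := by
    rw [hhits, List.mem_filterMap]
    refine ⟨c, hcks, ?_⟩
    have hidxc : PySem.List.index? ordered c = some l1.length := by
      rw [PySem.List.index?_eq_some_iff]
      exact ⟨l1, l2, hsplit, rfl, fun hmem => (hpre' c hmem) hcks⟩
    rw [hidxc]
    rfl
  have hlb : ∀ y ∈ hits, (l1.length : Int) ≤ y := by
    intro y hy
    rw [hhits, List.mem_filterMap] at hy
    obtain ⟨k, hkks, hk⟩ := hy
    rcases hidx : PySem.List.index? ordered k with _ | n
    · rw [hidx] at hk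
      exact absurd hk (by simp)
    · rw [hidx] at hk
      simp only [Option.map_some, Option.some.injEq] at hk
      subst hk
      obtain ⟨hn, hget, -⟩ := PySem.List.getElem_of_index?_eq_some hidx
      by_contra hlt
      push_cast at hlt
      have hnlt : n < l1.length := by omega
      have hord : ordered[n]'hn = l1[n]'hnlt := by
        subst hsplit
        exact List.getElem_append_left hnlt
      have hkl1 : k ∈ l1 := by
        rw [← hget, hord]
        exact List.getElem_mem _
      exact (hpre' k hkl1) hkks
  refine ⟨(l1.length : Int), ?_, ?_⟩
  · rcases hm : PySem.List.min? hits (fun x => x) with _ | m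
    · rw [PySem.List.min?_eq_none_iff] at hm
      rw [hm] at hjmem
      exact absurd hjmem (List.not_mem_nil)
    · have hmmem : m ∈ hits := PySem.List.min?_mem hm
      have hmle : m ≤ (l1.length : Int) := PySem.List.min?_isMin hm _ hjmem
      have hlem : (l1.length : Int) ≤ m := hlb m hmmem
      have : m = (l1.length : Int) := le_antisymm hmle hlem
      rw [this]
  · have : PySem.List.pyGet? ordered ((l1.length : Nat) : Int) = ordered[l1.length]? :=
      PySem.List.pyGet?_natCast ordered l1.length
    rw [this, hsplit]
    simp

-- B's build-index / collect-ranks / take-minimum pipeline equals one find? over the priority list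
-- followed by one truthy gate
theorem pv_B_flat (assets : List (String × String)) (ordered : List String) (fz : Option String) :
    (match PySem.List.min? ((assets.map Prod.fst).filterMap
        (fun k => ((PySem.List.enumerate ordered).foldl (fun d ic => d.setdefault ic.2 ic.1) PySem.Dict.empty).get? k)) (fun x => x) with
     | some i =>
       match PySem.List.pyGet? ordered i with
       | some c => if c == "" then fz else some c
       | none => none
     | none => fz)
    = match ordered.find? (fun c => pvHasKey assets c) with
      | some c => if c == "" then fz else some c
      | none => fz := by
  simp only [pv_rank_get, pv_hasKey_contains]
  rcases hf : ordered.find? (fun x => (assets.map Prod.fst).contains x) with _ | c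
  · rw [pv_hits_nil ordered (assets.map Prod.fst)
      (fun x hx => by simpa using List.find?_eq_none.mp hf x hx)]
    rfl
  · obtain ⟨i, hmin, hget⟩ := pv_hits_min ordered (assets.map Prod.fst) c hf
    rw [hmin]
    dsimp only
    rw [hget]

-- A's alias stage when the name has no alias entry: the staged form with an empty alias list
theorem pv_A_flat_nil (assets : List (String × String)) (gen : List String) (fz : Option String) :
    (if pvTruthy (none : Option String) then (none : Option String)
     else if pvTruthy (pvBestFrom assets gen) then pvBestFrom assets gen else fz)
    = match (gen ++ gen.map (fun c => c ++ "-jp2")).find? (fun c => pvHasKey assets c) with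
      | some c => if c == "" then fz else some c
      | none => fz := by
  have key := pv_A_flat assets [] gen fz (by simp)
  simpa [pvBestFrom, pvTruthy] using key

-- ===== VERDICT (by name: the statement is the Claim_ definition above) =====
theorem resolve_asset_key_py_spec : Claim_equal_resolve_asset_key_py := by
  intro assets desired _
  unfold Spec_resolve_asset_key_py resolve_asset_key_py resolve_asset_key_py_alt
  have e1 : ("_" : String) ++ "10m" = "_10m" := by decide
  have e2 : ("_" : String) ++ "20m" = "_20m" := by decide
  have e3 : ("_" : String) ++ "60m" = "_60m" := by decide
  simp only [List.flatMap_cons, List.flatMap_nil, List.map_cons, List.map_nil,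
    List.append_nil, String.append_assoc, e1, e2, e3]
  rcases halias : pvAliasMap.find? (fun p => p.1 == PySem.Str.upper desired) with _ | p
  · rw [halias]
    simp only [Option.map_none, Option.getD_none, List.map_nil, List.nil_append]
    rw [pv_B_flat]
    exact pv_A_flat_nil assets _ _
  · rw [halias]
    simp only [Option.map_some, Option.getD_some]
    rw [pv_B_flat]
    exact pv_A_flat assets p.2 _
      ((assets.map Prod.fst).find?
        (fun k => PySem.Str.startswith (PySem.Str.upper k) (PySem.Str.upper desired)))
      (pv_alias_nonempty (PySem.Str.upper desired) p halias)
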